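-- pv_equiv track=rewrite | github.com/etnnth/advent-of-code | year2020.py | day6p2
-- ===== SOURCE A (Python) =====
-- def day6p2(raw_data):
--     groups = raw_data.split("\n\n")
--     count = 0
--     for group in groups:
--         answers = group.split("\n")
--         common_answers = set(answers[0])
--         for a in answers:
--             common_answers &= set(a)
--         count += len(common_answers)
--     return count
-- ===== SOURCE B (Python) =====
-- def day6p2(raw_data):
--     # Occurrence-count table per group instead of iterated set intersection:
--     # count a char once per line, then tally chars seen in every line.
--     total = 0
--     for group in raw_data.split("\n\n"):
--         answers = group.split("\n")
--         counts = {}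
--         for line in answers:
--             for c in set(line):
--                 counts[c] = counts.get(c, 0) + 1
--         total += sum(1 for v in counts.values() if v == len(answers))
--     return total
-- ===== Notes on version B (the rewrite author's own statement) =====
-- stated objective: alternative
-- what changed: Replaces A's per-group iterated set intersection by a single pass that builds a per-character occurrence counter (one count per line via set(line)) and tallies characters whose count equals the number of lines.
import Mathlib
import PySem

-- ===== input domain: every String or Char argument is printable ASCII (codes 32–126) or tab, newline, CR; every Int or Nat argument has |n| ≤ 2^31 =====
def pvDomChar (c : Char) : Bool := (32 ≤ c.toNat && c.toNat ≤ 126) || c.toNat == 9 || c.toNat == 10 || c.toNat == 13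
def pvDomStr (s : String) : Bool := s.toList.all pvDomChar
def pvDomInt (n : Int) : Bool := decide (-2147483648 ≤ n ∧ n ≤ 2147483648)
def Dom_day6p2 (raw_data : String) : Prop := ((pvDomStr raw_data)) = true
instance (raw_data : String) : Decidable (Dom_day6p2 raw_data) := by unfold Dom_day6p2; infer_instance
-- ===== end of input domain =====

-- B replaces A's shrinking set intersection per group by a per-line occurrence counter
-- plus a count-equals-number-of-lines tally; objective: alternative decomposition, same cost.

-- ===== PORT A =====
-- answers[0] is ported as pyGetD …  0 []: group.split("\n") is never empty, so Python never raises here.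
def day6p2 (raw_data : String) : Int :=
  (PySem.Chars.splitOn raw_data.toList ("\n\n".toList)).foldl (fun count group =>
    let answers := PySem.Chars.splitOn group ("\n".toList)
    let common := answers.foldl (fun s a => PySem.Set.inter s (PySem.Set.ofList a))
        (PySem.Set.ofList (PySem.List.pyGetD answers 0 []))
    count + (PySem.Set.len common : Int)) 0

-- ===== PORT B =====
def day6p2_alt (raw_data : String) : Int :=
  (PySem.Chars.splitOn raw_data.toList ("\n\n".toList)).foldl (fun total group =>
    let answers := PySem.Chars.splitOn group ("\n".toList)
    let counts := answers.foldl (fun d line =>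
        (PySem.Set.ofList line).foldl (fun d c => d.insert c (d.getD c 0 + 1)) d)
      (PySem.Dict.empty : PySem.Dict Char Int)
    total + ((counts.values.map (fun v => if v = (answers.length : Int) then (1:Int) else 0)).sum)) 0

-- ===== PRECONDITION & SPEC =====
def Spec_day6p2 (raw_data : String) (out : Int) : Prop := out = day6p2_alt raw_data
instance (raw_data : String) (out : Int) : Decidable (Spec_day6p2 raw_data out) := by unfold Spec_day6p2; infer_instance

-- ===== CLAIM (what is proved, stated in full; the proofs are below) =====
def Claim_equal_day6p2 : Prop := ∀ (raw_data : String), Dom_day6p2 raw_data → Spec_day6p2 raw_data (day6p2 raw_data)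

-- ===== LEMMAS AND PROOFS =====

-- A's inner loop: folding set intersection is filtering by membership in every line.
lemma pv_interfold (ls : List (List Char)) (S : PySem.Set Char) :
    ls.foldl (fun s a => PySem.Set.inter s (PySem.Set.ofList a)) S
      = S.filter (fun c => ls.all (fun a => (PySem.Set.ofList a).contains c)) := by
  induction ls generalizing S with
  | nil => simp
  | cons a ls ih =>
    rw [List.foldl_cons, ih]
    simp only [PySem.Set.inter, List.filter_filter]
    apply List.filter_congr
    intro x _
    simp [Bool.and_comm]

-- how often a char occurs in the concatenation of the per-line dedups = in how many lines it occurs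
lemma pv_countflat (ls : List (List Char)) (k : Char) :
    (ls.flatMap (fun l => PySem.Set.ofList l)).count k = ls.countP (fun l => decide (k ∈ l)) := by
  induction ls with
  | nil => simp
  | cons l ls ih =>
    simp only [List.flatMap_cons, List.count_append, ih, List.countP_cons]
    have h : (PySem.Set.ofList l).count k = if k ∈ l then 1 else 0 := by
      rw [(PySem.Set.nodup_ofList l).count]
      simp [PySem.Set.mem_ofList]
    rw [h]
    split <;> simp_all [Nat.add_comm]

-- per-group equality: |∩ sets| = #{chars whose occurrence count equals the number of lines}
lemma pv_group_eq (ls : List (List Char)) :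
    ((PySem.Set.len (ls.foldl (fun s a => PySem.Set.inter s (PySem.Set.ofList a))
        (PySem.Set.ofList (PySem.List.pyGetD ls 0 []))) : Int))
    = ((ls.foldl (fun d line => (PySem.Set.ofList line).foldl
            (fun d c => d.insert c (d.getD c 0 + 1)) d)
          (PySem.Dict.empty : PySem.Dict Char Int)).values.map
        (fun v => if v = (ls.length : Int) then (1:Int) else 0)).sum := by
  -- B's dict loop is Counter(flatMap of per-line dedups)
  have hcnt : ls.foldl (fun d line => (PySem.Set.ofList line).foldl
        (fun d c => d.insert c (d.getD c 0 + 1)) d)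
        (PySem.Dict.empty : PySem.Dict Char Int)
      = PySem.Dict.counter (ls.flatMap (fun l => PySem.Set.ofList l)) := by
    rw [PySem.Dict.counter_eq_foldl, List.foldl_flatMap]
    rfl
  rw [hcnt]
  set ys := ls.flatMap (fun l => PySem.Set.ofList l) with hys
  have hvals : (PySem.Dict.counter ys).values
      = (PySem.Set.ofList ys).map (fun k => ((ys.count k : Int))) := by
    simp [PySem.Dict.values, PySem.Dict.items_counter]
  rw [hvals, List.map_map]
  have hsum : ((PySem.Set.ofList ys).map
        ((fun v => if v = (ls.length : Int) then (1:Int) else 0) ∘ fun k => ((ys.count k : Int)))).sum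
      = ((PySem.Set.ofList ys).countP (fun k => decide ((ys.count k : Int) = (ls.length : Int))) : Int) := by
    rw [← PySem.List.sum_map_ite_one_zero]
    apply congrArg
    apply List.map_congr_left
    intro k _
    simp [Function.comp]
  rw [hsum, pv_interfold]
  cases ls with
  | nil => simp [PySem.Set.len]
  | cons l0 rest =>
    have hget : PySem.List.pyGetD (l0 :: rest) 0 [] = l0 := by
      simp [pysem]
    rw [hget]
    simp only [PySem.Set.len, List.countP_eq_length_filter]
    apply congrArg
    apply List.Perm.length_eq
    rw [List.perm_ext_iff_of_nodup
      ((PySem.Set.nodup_ofList l0).filter _) ((PySem.Set.nodup_ofList ys).filter _)]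
    intro k
    have hall : ((l0 :: rest).countP (fun l => decide (k ∈ l)) = (l0 :: rest).length)
        ↔ ∀ l ∈ (l0 :: rest), k ∈ l := by
      rw [List.countP_eq_length]
      simp
    simp only [List.mem_filter, PySem.Set.mem_ofList, decide_eq_true_eq, Nat.cast_inj, hys,
      pv_countflat, hall, List.all_eq_true, PySem.Set.contains, List.contains_iff_mem,
      PySem.Set.mem_ofList, List.mem_flatMap]
    constructor
    · rintro ⟨h0, h⟩
      exact ⟨⟨l0, by simp, h0⟩, h⟩
    · rintro ⟨-, h⟩
      exact ⟨h l0 (by simp), h⟩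

-- ===== VERDICT (by name: the statement is the Claim_ definition above) =====
theorem day6p2_spec : Claim_equal_day6p2 := by
  intro raw _
  show day6p2 raw = day6p2_alt raw
  unfold day6p2 day6p2_alt
  rw [PySem.List.foldl_add, PySem.List.foldl_add]
  apply congrArg
  apply congrArg
  apply List.map_congr_left
  intro g _
  exact pv_group_eq (PySem.Chars.splitOn g ("\n".toList))
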